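-- pv_equiv track=rewrite | github.com/haiyinde/APS | Programmers/Level1/모의고사.py | solution
-- ===== SOURCE A (Python) =====
-- def solution(answers):
--     student1 = [1, 2, 3, 4, 5]
--     student2 = [2, 1, 2, 3, 2, 4, 2, 5]
--     student3 = [3, 3, 1, 1, 2, 2, 4, 4, 5, 5]
--
--     winner = []
--
--     o1 = 0
--     o2 = 0
--     o3 = 0
--     for i in range(len(answers)):
--         now = answers[i]
--         c1 = i % 5
--         c2 = i % 8
--         c3 = i % 10
--
--         if now == student1[c1]:
--             o1 += 1
--         if now == student2[c2]:
--             o2 += 1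
--         if now == student3[c3]:
--             o3 += 1
--
--     highest_score = max(o1, o2, o3)
--
--     if highest_score == o1:
--         winner.append(1)
--     if highest_score == o2:
--         winner.append(2)
--     if highest_score == o3:
--         winner.append(3)
--
--     return winner
-- ===== SOURCE B (Python) =====
-- def solution(answers):
--     # Histogram approach: one pass builds counts of (position mod 40, answer) pairs
--     # (40 = lcm of the three pattern lengths); each pattern's score is then read off
--     # the histogram in O(1), without rescanning the answers.
--     patterns = [(1, [1, 2, 3, 4, 5]),
--                 (2, [2, 1, 2, 3, 2, 4, 2, 5]),
--                 (3, [3, 3, 1, 1, 2, 2, 4, 4, 5, 5])]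
--     hist = {}
--     for i, a in enumerate(answers):
--         key = (i % 40, a)
--         hist[key] = hist.get(key, 0) + 1
--     scores = [(n, sum(hist.get((r, p[r % len(p)]), 0) for r in range(40)))
--               for n, p in patterns]
--     best = 0
--     for _, s in scores:
--         if s > best:
--             best = s
--     return [n for n, s in scores if s == best]
-- ===== Notes on version B (the rewrite author's own statement) =====
-- stated objective: alternative
-- what changed: A counts matches for all three patterns in one fused loop over the answers; B instead builds a histogram of (index mod 40, answer) pairs (40 = lcm of the pattern lengths) in one pass and then computes each pattern's score purely from the histogram via 40 lookups, plus a running-max loop and a comprehension to collect the winners.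
import Mathlib
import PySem

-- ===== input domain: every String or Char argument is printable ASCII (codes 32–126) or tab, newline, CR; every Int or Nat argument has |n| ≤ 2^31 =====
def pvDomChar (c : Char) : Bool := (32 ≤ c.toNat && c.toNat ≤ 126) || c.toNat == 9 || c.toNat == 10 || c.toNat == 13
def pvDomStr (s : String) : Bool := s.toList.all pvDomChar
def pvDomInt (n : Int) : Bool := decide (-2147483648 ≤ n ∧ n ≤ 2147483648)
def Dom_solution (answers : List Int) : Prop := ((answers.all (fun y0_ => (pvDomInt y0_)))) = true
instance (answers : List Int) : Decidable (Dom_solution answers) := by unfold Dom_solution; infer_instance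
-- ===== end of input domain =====

-- B replaces A's fused three-counter loop by a (index mod 40, answer) histogram built in one
-- pass, from which each pattern's score is read off by 40 lookups; objective: alternative.


-- ===== PORT A =====
def solution (answers : List Int) : List Int :=
  let student1 : List Int := [1, 2, 3, 4, 5]
  let student2 : List Int := [2, 1, 2, 3, 2, 4, 2, 5]
  let student3 : List Int := [3, 3, 1, 1, 2, 2, 4, 4, 5, 5]
  -- 'for i in range(len(answers)): now = answers[i]; …' as a fold over enumerate,
  -- carrying the three counters (o1, o2, o3); p.2 is 'now', p.1 is 'i'
  let os :=
    (PySem.List.enumerate answers).foldl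
      (fun (s : Int × Int × Int) p =>
        (if p.2 = PySem.List.pyGetD student1 (PySem.Int.mod p.1 5) 0 then s.1 + 1 else s.1,
         if p.2 = PySem.List.pyGetD student2 (PySem.Int.mod p.1 8) 0 then s.2.1 + 1 else s.2.1,
         if p.2 = PySem.List.pyGetD student3 (PySem.Int.mod p.1 10) 0 then s.2.2 + 1 else s.2.2))
      (0, 0, 0)
  let highest_score := max os.1 (max os.2.1 os.2.2)
  ((if highest_score = os.1 then [(1 : Int)] else []) ++
   (if highest_score = os.2.1 then [(2 : Int)] else [])) ++
   (if highest_score = os.2.2 then [(3 : Int)] else [])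

-- ===== PORT B =====
def solution_alt (answers : List Int) : List Int :=
  let patterns : List (Int × List Int) :=
    [(1, [1, 2, 3, 4, 5]), (2, [2, 1, 2, 3, 2, 4, 2, 5]), (3, [3, 3, 1, 1, 2, 2, 4, 4, 5, 5])]
  -- hist[(i % 40, a)] = hist.get((i % 40, a), 0) + 1
  let hist : PySem.Dict (Int × Int) Int :=
    (PySem.List.enumerate answers).foldl
      (fun d q =>
        let key : Int × Int := (PySem.Int.mod q.1 40, q.2)
        d.insert key (d.getD key 0 + 1))
      PySem.Dict.empty
  -- scores = [(n, sum(hist.get((r, p[r % len(p)]), 0) for r in range(40))) for n, p in patterns]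
  let scores : List (Int × Int) :=
    patterns.map (fun np =>
      (np.1,
       ((PySem.List.pyRange 0 40 1).map
         (fun r => hist.getD (r, PySem.List.pyGetD np.2 (PySem.Int.mod r (np.2.length : Int)) 0) 0)).sum))
  -- best = 0; for _, s in scores: if s > best: best = s
  let best := scores.foldl (fun b q => if q.2 > b then q.2 else b) 0
  (scores.filter (fun q => q.2 = best)).map (fun q => q.1)

-- ===== PRECONDITION & SPEC =====
def Spec_solution (answers : List Int) (out : List Int) : Prop := out = solution_alt answers
instance (answers : List Int) (out : List Int) : Decidable (Spec_solution answers out) := by unfold Spec_solution; infer_instance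

-- ===== CLAIM (what is proved, stated in full; the proofs are below) =====
def Claim_equal_solution : Prop := ∀ (answers : List Int), Dom_solution answers → Spec_solution answers (solution answers)

-- ===== LEMMAS AND PROOFS =====

-- A fold carrying three independent counters equals the triple of the three indicator sums.
theorem pv_tri_fold (l : List (Int × Int)) (c1 c2 c3 : Int × Int → Prop)
    [DecidablePred c1] [DecidablePred c2] [DecidablePred c3] (a b c : Int) :
    l.foldl
      (fun (s : Int × Int × Int) p =>
        (if c1 p then s.1 + 1 else s.1,
         if c2 p then s.2.1 + 1 else s.2.1,
         if c3 p then s.2.2 + 1 else s.2.2)) (a, b, c)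
    = (a + (l.map (fun p => if c1 p then (1 : Int) else 0)).sum,
       b + (l.map (fun p => if c2 p then (1 : Int) else 0)).sum,
       c + (l.map (fun p => if c3 p then (1 : Int) else 0)).sum) := by
  induction l generalizing a b c with
  | nil => simp
  | cons h t ih =>
    simp only [List.foldl_cons, List.map_cons, List.sum_cons, ih]
    split_ifs <;> simp <;> ring_nf <;> trivial

-- Sum over a range of a point indicator: only r = j can contribute.
theorem pv_sum_ind (P : Int → Prop) [DecidablePred P] :
    ∀ (n : Nat) (a j : Int),
    ((PySem.List.pyRange a (a + n) 1).map (fun r => if r = j ∧ P r then (1 : Int) else 0)).sum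
    = if a ≤ j ∧ j < a + n ∧ P j then 1 else 0 := by
  intro n
  induction n with
  | zero =>
    intro a j
    rw [PySem.List.pyRange_one_eq_nil (by simp)]
    simp only [List.map_nil, List.sum_nil]
    split_ifs with h
    · omega
    · rfl
  | succ n ih =>
    intro a j
    rw [PySem.List.pyRange_one_cons (by omega)]
    simp only [List.map_cons, List.sum_cons]
    rw [show (a + ((n + 1 : Nat) : Int)) = (a + 1) + (n : Int) from by push_cast; ring, ih (a + 1) j]
    by_cases hP : P j
    · by_cases hja : a = j
      · subst hja
        rw [if_pos ⟨rfl, hP⟩, if_neg (by omega), if_pos ⟨le_refl a, by omega, hP⟩]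
        norm_num
      · rw [if_neg (by tauto), zero_add]
        by_cases h1 : a + 1 ≤ j ∧ j < a + 1 + (n : Int)
        · rw [if_pos ⟨h1.1, h1.2, hP⟩, if_pos ⟨by omega, by omega, hP⟩]
        · rw [if_neg (fun h => h1 ⟨h.1, h.2.1⟩), if_neg (fun h => h1 ⟨by omega, by omega⟩)]
    · have hja : ¬ (a = j ∧ P a) := fun h => hP (h.1 ▸ h.2)
      rw [if_neg hja, zero_add, if_neg (by tauto), if_neg (by tauto)]

-- Python's i % m for nonneg i and positive m is Int.emod.
theorem pv_mod_nn (i : Int) (m : Int) (hm : 0 < m) : PySem.Int.mod i m = i % m :=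
  PySem.Int.mod_eq_emod_of_pos hm

-- The histogram score of one pattern equals the fused loop's indicator sum for that pattern.
theorem pv_hist_score (pat : List Int) (m : Int)
    (hdvd : m ∣ 40) (hpos : 0 < m) (l : List (Int × Int)) (hnn : ∀ q ∈ l, 0 ≤ q.1) :
    ((PySem.List.pyRange 0 40 1).map
      (fun r =>
        (((l.map (fun q => ((PySem.Int.mod q.1 40, q.2) : Int × Int))).count
            (r, PySem.List.pyGetD pat (PySem.Int.mod r m) 0) : Nat) : Int))).sum
    = (l.map (fun q => if q.2 = PySem.List.pyGetD pat (PySem.Int.mod q.1 m) 0 then (1 : Int) else 0)).sum := by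
  induction l with
  | nil => simp
  | cons q t ih =>
    have hq : 0 ≤ q.1 := hnn q List.mem_cons_self
    have iht := ih (fun x hx => hnn x (List.mem_cons_of_mem q hx))
    have hone :
        ((PySem.List.pyRange 0 40 1).map
          (fun r => if r = (PySem.Int.mod q.1 40)
                      ∧ q.2 = PySem.List.pyGetD pat (PySem.Int.mod r m) 0
                    then (1 : Int) else 0)).sum
        = if q.2 = PySem.List.pyGetD pat (PySem.Int.mod q.1 m) 0 then (1 : Int) else 0 := by
      have h40 := pv_sum_ind (fun r => q.2 = PySem.List.pyGetD pat (PySem.Int.mod r m) 0)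
        40 0 (PySem.Int.mod q.1 40)
      simp only [zero_add] at h40
      rw [show ((40 : Nat) : Int) = (40 : Int) from rfl] at h40
      have hb1 : 0 ≤ PySem.Int.mod q.1 40 := by
        rw [pv_mod_nn _ _ (by norm_num)]; exact Int.emod_nonneg _ (by norm_num)
      have hb2 : PySem.Int.mod q.1 40 < 40 := by
        rw [pv_mod_nn _ _ (by norm_num)]; exact Int.emod_lt_of_pos _ (by norm_num)
      have hmm : PySem.Int.mod (PySem.Int.mod q.1 40) m = PySem.Int.mod q.1 m := by
        rw [pv_mod_nn (PySem.Int.mod q.1 40) m hpos, pv_mod_nn q.1 (40 : Int) (by norm_num),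
          pv_mod_nn q.1 m hpos, Int.emod_emod_of_dvd _ hdvd]
      rw [hmm] at h40
      rw [h40]
      exact if_congr ⟨fun h => h.2.2, fun h => ⟨hb1, hb2, h⟩⟩ rfl rfl
    have hstep :
        ((PySem.List.pyRange 0 40 1).map
          (fun r => ((((t.map (fun q => ((PySem.Int.mod q.1 40, q.2) : Int × Int))).count
                (r, PySem.List.pyGetD pat (PySem.Int.mod r m) 0))
              + (if ((PySem.Int.mod q.1 40, q.2) : Int × Int)
                    = (r, PySem.List.pyGetD pat (PySem.Int.mod r m) 0) then 1 else 0) : Nat) : Int))).sum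
        = ((PySem.List.pyRange 0 40 1).map
            (fun r => (((t.map (fun q => ((PySem.Int.mod q.1 40, q.2) : Int × Int))).count
              (r, PySem.List.pyGetD pat (PySem.Int.mod r m) 0) : Nat) : Int))).sum
          + ((PySem.List.pyRange 0 40 1).map
              (fun r => if r = (PySem.Int.mod q.1 40)
                          ∧ q.2 = PySem.List.pyGetD pat (PySem.Int.mod r m) 0
                        then (1 : Int) else 0)).sum := by
      rw [← PySem.List.sum_map_add_int]
      apply congrArg
      apply List.map_congr_left
      intro r _
      push_cast
      congr 1
      refine if_congr ?_ rfl rfl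
      rw [Prod.ext_iff]
      exact ⟨fun h => ⟨h.1.symm, h.2⟩, fun h => ⟨h.1.symm, h.2⟩⟩
    simp only [List.map_cons, List.sum_cons, List.count_cons, beq_iff_eq]
    rw [hstep, iht, hone]
    ring

-- Indicator sums are nonnegative.
theorem pv_ind_nonneg (l : List (Int × Int)) (c : Int × Int → Prop) [DecidablePred c] :
    0 ≤ (l.map (fun p => if c p then (1 : Int) else 0)).sum := by
  apply List.sum_nonneg
  intro x hx
  simp only [List.mem_map] at hx
  obtain ⟨p, _, hp⟩ := hx
  rw [← hp]
  split_ifs <;> norm_num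

-- B's running-max loop over the three (nonnegative) scores computes max s1 (max s2 s3).
theorem pv_best (s1 s2 s3 : Int) (h1 : 0 ≤ s1) (h2 : 0 ≤ s2) (h3 : 0 ≤ s3) :
    ([((1 : Int), s1), (2, s2), (3, s3)] : List (Int × Int)).foldl
      (fun b q => if q.2 > b then q.2 else b) 0
    = max s1 (max s2 s3) := by
  simp only [List.foldl_cons, List.foldl_nil]
  split_ifs <;> simp [max_def] <;> omega

-- A's three-ifs assembly of the winner list equals B's filter over the (number, score) pairs.
set_option maxRecDepth 10000 in
theorem pv_winners (S1 S2 S3 : Int) :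
    ((if max S1 (max S2 S3) = S1 then [(1:Int)] else []) ++
     (if max S1 (max S2 S3) = S2 then [(2:Int)] else [])) ++
     (if max S1 (max S2 S3) = S3 then [(3:Int)] else [])
    = (([((1:Int),S1),(2,S2),(3,S3)]).filter (fun q => q.2 = max S1 (max S2 S3))).map (fun x => x.1) := by
  simp only [List.filter_cons, List.filter_nil, decide_eq_true_eq]
  split_ifs <;> first | rfl | omega

theorem pv_enum_nonneg (answers : List Int) :
    ∀ q ∈ PySem.List.enumerate answers, 0 ≤ q.1 := by
  intro q hq
  rw [PySem.List.mem_enumerate_iff] at hq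
  obtain ⟨k, hk, rfl⟩ := hq
  simp

theorem solution_eq_alt (answers : List Int) : solution answers = solution_alt answers := by
  have hnn := pv_enum_nonneg answers
  have hcnt : ∀ k : Int × Int,
      (((PySem.List.enumerate answers).map
          (fun q => ((PySem.Int.mod q.1 40, q.2) : Int × Int))).foldl
        (fun (d : PySem.Dict (Int × Int) Int) x => d.insert x (d.getD x 0 + 1))
        PySem.Dict.empty).getD k 0
      = ((((PySem.List.enumerate answers).map
          (fun q => ((PySem.Int.mod q.1 40, q.2) : Int × Int))).count k : Nat) : Int) := by
    intro k
    rw [PySem.Dict.getD_foldl_insert_add_one]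
    simp
  simp only [solution, solution_alt, List.map_cons, List.map_nil,
    List.length_cons, List.length_nil, Nat.reduceAdd, Nat.cast_ofNat]
  rw [pv_tri_fold (PySem.List.enumerate answers)
      (fun p => p.2 = PySem.List.pyGetD [1,2,3,4,5] (PySem.Int.mod p.1 5) 0)
      (fun p => p.2 = PySem.List.pyGetD [2,1,2,3,2,4,2,5] (PySem.Int.mod p.1 8) 0)
      (fun p => p.2 = PySem.List.pyGetD [3,3,1,1,2,2,4,4,5,5] (PySem.Int.mod p.1 10) 0) 0 0 0]
  simp only [zero_add]
  have hfold :
      (List.foldl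
        (fun (d : PySem.Dict (Int × Int) Int) (q : Int × Int) =>
          d.insert (PySem.Int.mod q.1 40, q.2) (d.getD (PySem.Int.mod q.1 40, q.2) 0 + 1))
        PySem.Dict.empty (PySem.List.enumerate answers))
      = List.foldl (fun (d : PySem.Dict (Int × Int) Int) x => d.insert x (d.getD x 0 + 1))
          PySem.Dict.empty
          ((PySem.List.enumerate answers).map
            (fun q => ((PySem.Int.mod q.1 40, q.2) : Int × Int))) :=
    (List.foldl_map
      (f := fun q : Int × Int => ((PySem.Int.mod q.1 40, q.2) : Int × Int))
      (g := fun (d : PySem.Dict (Int × Int) Int) x => d.insert x (d.getD x 0 + 1))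
      (l := PySem.List.enumerate answers) (init := PySem.Dict.empty)).symm
  rw [hfold]
  simp only [hcnt]
  rw [pv_hist_score [1,2,3,4,5] 5 (by norm_num) (by norm_num) _ hnn,
      pv_hist_score [2,1,2,3,2,4,2,5] 8 (by norm_num) (by norm_num) _ hnn,
      pv_hist_score [3,3,1,1,2,2,4,4,5,5] 10 (by norm_num) (by norm_num) _ hnn]
  rw [pv_best _ _ _ (pv_ind_nonneg _ _) (pv_ind_nonneg _ _) (pv_ind_nonneg _ _)]
  exact pv_winners _ _ _

-- ===== VERDICT (by name: the statement is the Claim_ definition above) =====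
theorem solution_spec : Claim_equal_solution := by
  intro answers _
  unfold Spec_solution
  exact solution_eq_alt answers
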